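-- pv_equiv track=rewrite | github.com/efzrh/rteval | rteval/cpulist_utils.py | collapse_cpulist
-- ===== SOURCE A (Python) =====
-- def collapse_cpulist(cpulist):
--     """
--     Collapse a list of cpu numbers into a string range
--     of cpus (e.g. 0-5, 7, 9)
--     """
--     cur_range = [None, None]
--     result = []
--     for cpu in cpulist + [None]:
--         if cur_range[0] is None:
--             cur_range[0] = cur_range[1] = cpu
--             continue
--         if cpu is not None and cpu == cur_range[1] + 1:
--             # Extend currently processed range
--             cur_range[1] += 1
--         else:
--             # Range processing finished, add range to string
--             result.append(f"{cur_range[0]}-{cur_range[1]}"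
--                           if cur_range[0] != cur_range[1]
--                           else str(cur_range[0]))
--             # Reset
--             cur_range[0] = cur_range[1] = cpu
--     return ",".join(result)
-- ===== SOURCE B (Python) =====
-- def collapse_cpulist(cpulist):
--     """
--     Collapse a list of cpu numbers into a string range
--     of cpus (e.g. 0-5, 7, 9)
--     """
--     n = len(cpulist)
--     # stage 1: all positions that start a maximal consecutive run
--     starts = [i for i in range(n) if i == 0 or cpulist[i] != cpulist[i - 1] + 1]
--     # stage 2: pair each run start with the next start (or n) and format
--     return ",".join(
--         str(cpulist[s]) if e - 1 == s else f"{cpulist[s]}-{cpulist[e - 1]}"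
--         for s, e in zip(starts, starts[1:] + [n])
--     )
-- ===== Notes on version B (the rewrite author's own statement) =====
-- stated objective: alternative
-- what changed: Replaced A's mutable sentinel-flushed state machine over cpulist+[None] by two stateless staged passes: a comprehension that lists all run-start indices (where the +1 chain breaks), then a zip of consecutive start indices formatting each run from its boundary positions.
import Mathlib
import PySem

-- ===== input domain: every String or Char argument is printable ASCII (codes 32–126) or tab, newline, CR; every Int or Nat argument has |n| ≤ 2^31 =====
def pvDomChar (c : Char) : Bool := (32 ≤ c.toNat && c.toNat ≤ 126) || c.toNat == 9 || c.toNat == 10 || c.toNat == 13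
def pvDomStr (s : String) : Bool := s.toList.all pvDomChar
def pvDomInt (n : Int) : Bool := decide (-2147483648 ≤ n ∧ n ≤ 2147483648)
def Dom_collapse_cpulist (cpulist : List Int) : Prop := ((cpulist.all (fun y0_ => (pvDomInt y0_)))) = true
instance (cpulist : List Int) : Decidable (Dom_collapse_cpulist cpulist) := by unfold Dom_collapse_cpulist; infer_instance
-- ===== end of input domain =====

-- B replaces A's mutable sentinel-flushed state machine by two stateless staged passes:
-- list every run-start index, then zip consecutive starts and format each run; objective: alternative.

-- ===== PORT A =====
-- state: cur_range (both cells None or both set, as in the Python) and result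
def ccStepA (st : Option (Int × Int) × List String) (cpu : Option Int) :
    Option (Int × Int) × List String :=
  match st.1 with
  | none => (cpu.map (fun c => (c, c)), st.2)
  | some (a, b) =>
    if cpu = some (b + 1) then (some (a, b + 1), st.2)
    else (cpu.map (fun c => (c, c)),
          st.2 ++ [if a ≠ b then PySem.Int.toStr a ++ "-" ++ PySem.Int.toStr b
                   else PySem.Int.toStr a])

def collapse_cpulist (cpulist : List Int) : String :=
  PySem.Str.join "," (((cpulist.map some ++ [none]).foldl ccStepA (none, [])).2)

-- ===== PORT B =====
-- stage 1: run-start indices (the comprehension over range(n))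
def bStarts (xs : List Int) : List Nat :=
  (List.range xs.length).filter (fun i => i == 0 || !(xs.getD i 0 == xs.getD (i - 1) 0 + 1))

-- stage 2: format one run from its start index and the next start (or n)
def bFmt (xs : List Int) (p : Nat × Nat) : String :=
  if p.2 - 1 = p.1 then PySem.Int.toStr (xs.getD p.1 0)
  else PySem.Int.toStr (xs.getD p.1 0) ++ "-" ++ PySem.Int.toStr (xs.getD (p.2 - 1) 0)

def collapse_cpulist_alt (cpulist : List Int) : String :=
  PySem.Str.join ","
    (((bStarts cpulist).zip ((bStarts cpulist).tail ++ [cpulist.length])).map (bFmt cpulist))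

-- ===== PRECONDITION & SPEC =====
def Spec_collapse_cpulist (cpulist : List Int) (out : String) : Prop := out = collapse_cpulist_alt cpulist
instance (cpulist : List Int) (out : String) : Decidable (Spec_collapse_cpulist cpulist out) := by unfold Spec_collapse_cpulist; infer_instance

-- ===== CLAIM (what is proved, stated in full; the proofs are below) =====
def Claim_equal_collapse_cpulist : Prop := ∀ (cpulist : List Int), Dom_collapse_cpulist cpulist → Spec_collapse_cpulist cpulist (collapse_cpulist cpulist)

-- ===== LEMMAS AND PROOFS =====

-- formatting of one run (common characterisation)
def ccFmt (a b : Int) : String :=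
  if a = b then PySem.Int.toStr a
  else PySem.Int.toStr a ++ "-" ++ PySem.Int.toStr b


-- consume the maximal +1-run continuing from end `b`; returns (last, remainder)
def ccChop (b : Int) : List Int → Int × List Int
  | [] => (b, [])
  | x :: xs => if x = b + 1 then ccChop x xs else (b, x :: xs)
theorem ccChop_len (b : Int) (xs : List Int) : (ccChop b xs).2.length ≤ xs.length := by
  induction xs generalizing b with
  | nil => simp [ccChop]
  | cons x xs ih =>
    simp only [ccChop]
    split
    · exact le_trans (ih x) (by simp)
    · simp

-- the reference run decomposition
def ccRuns : List Int → List String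
  | [] => []
  | a :: rest => ccFmt a (ccChop a rest).1 :: ccRuns (ccChop a rest).2
termination_by xs => xs.length
decreasing_by have := ccChop_len a rest; simpa using Nat.lt_succ_of_le this

theorem foldA_runs (xs : List Int) (a b : Int) (acc : List String) :
    (xs.map some ++ [none]).foldl ccStepA (some (a, b), acc)
      = (none, acc ++ ccFmt a (ccChop b xs).1 :: ccRuns (ccChop b xs).2) := by
  induction xs generalizing a b acc with
  | nil => simp [ccStepA, ccChop, ccRuns, ccFmt]
  | cons x xs ih =>
    simp only [List.map_cons, List.cons_append, List.foldl_cons]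
    by_cases h : x = b + 1
    · subst h
      have hstep : ccStepA (some (a, b), acc) (some (b + 1)) = (some (a, b + 1), acc) := by
        simp [ccStepA]
      rw [hstep, ccChop, if_pos rfl]
      exact ih a (b + 1) acc
    · have hstep : ccStepA (some (a, b), acc) (some x)
          = (some (x, x), acc ++ [ccFmt a b]) := by
        simp [ccStepA, h, ccFmt]
      rw [hstep, ih, ccChop, if_neg h]
      rw [ccRuns]
      simp

theorem A_eq_runs (xs : List Int) :
    collapse_cpulist xs = PySem.Str.join "," (ccRuns xs) := by
  cases xs with
  | nil => simp [collapse_cpulist, ccStepA, ccRuns]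
  | cons x rest =>
    simp only [collapse_cpulist, List.map_cons, List.cons_append, List.foldl_cons]
    have hstep : ccStepA (none, []) (some x) = (some (x, x), []) := by simp [ccStepA]
    rw [hstep, foldA_runs]
    rw [ccRuns]
    simp

-- structure of the maximal run found by ccChop
theorem chop_decomp (b : Int) (ys : List Int) :
    ∃ k : Nat, (ccChop b ys).1 = b + k ∧
      ys = (List.range k).map (fun i : Nat => b + 1 + (i : Int)) ++ (ccChop b ys).2 ∧
      ∀ z ∈ (ccChop b ys).2.head?, z ≠ b + k + 1 := by
  induction ys generalizing b with
  | nil => exact ⟨0, by simp [ccChop]⟩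
  | cons x t ih =>
    by_cases h : x = b + 1
    · obtain ⟨k, h1, h2, h3⟩ := ih x
      subst h
      refine ⟨k + 1, ?_, ?_, ?_⟩
      · rw [ccChop, if_pos rfl, h1]; push_cast; ring
      · rw [ccChop, if_pos rfl, List.range_succ_eq_map]
        have hf : ((fun i : Nat => b + 1 + (i : Int)) ∘ Nat.succ) = (fun i : Nat => (b + 1) + 1 + (i : Int)) := by
          funext i; simp [Function.comp]; ring
        rw [List.map_cons, List.map_map, hf, List.cons_append]
        exact congrArg₂ List.cons (by simp) h2
      · rw [ccChop, if_pos rfl]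
        intro z hz
        have := h3 z hz
        intro he; apply this; rw [he]; push_cast; ring
    · refine ⟨0, ?_, ?_, ?_⟩ <;> rw [ccChop, if_neg h]
      · simp
      · simp
      · intro z hz; simp at hz; subst hz; simpa using h

theorem getD_run (a : Int) (rem : List Int) (k i : Nat) (hi : i ≤ k) :
    (a :: (List.range k).map (fun i : Nat => a + 1 + (i : Int)) ++ rem).getD i 0 = a + i := by
  match i with
  | 0 => simp
  | j + 1 =>
    have hj : j < k := by omega
    rw [List.cons_append, List.getD_cons_succ,
      List.getD_append _ _ _ _ (by simpa using hj)]
    simp [List.getD, hj]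
    ring

theorem getD_rem (a : Int) (rem : List Int) (k i : Nat) :
    (a :: (List.range k).map (fun i : Nat => a + 1 + (i : Int)) ++ rem).getD ((k + 1) + i) 0
      = rem.getD i 0 := by
  rw [List.cons_append, show (k+1)+i = (k+i)+1 from by omega, List.getD_cons_succ,
    List.getD_append_right _ _ _ _ (by simp)]
  congr 1
  simp

theorem starts_head (rem : List Int) (h : rem ≠ []) :
    ∃ t, bStarts rem = 0 :: t ∧ ∀ e ∈ t, 1 ≤ e := by
  cases rem with
  | nil => exact absurd rfl h
  | cons z r =>
    have h0 : bStarts (z :: r)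
        = 0 :: ((List.range r.length).map Nat.succ).filter
            (fun i => i == 0 || !((z :: r).getD i 0 == (z :: r).getD (i - 1) 0 + 1)) := by
      rw [bStarts, show (z::r).length = r.length + 1 from by simp,
        List.range_succ_eq_map, List.filter_cons, if_pos (by simp)]
    refine ⟨_, h0, ?_⟩
    intro e he
    have := List.mem_of_mem_filter he
    simp only [List.mem_map, List.mem_range] at this
    obtain ⟨j, _, rfl⟩ := this
    omega

theorem fmt_head (a : Int) (rem : List Int) (k : Nat) :
    bFmt (a :: (List.range k).map (fun i : Nat => a + 1 + (i : Int)) ++ rem) (0, k + 1)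
      = ccFmt a (a + k) := by
  have e0 := getD_run a rem k 0 (by omega)
  have ek := getD_run a rem k k le_rfl
  simp only [bFmt, ccFmt]
  by_cases hk : k = 0
  · subst hk; simp
  · rw [if_neg (by omega), if_neg (fun h => hk (by omega))]
    have e0' : (a :: List.map (fun i : Nat => a + 1 + (i : Int)) (List.range k) ++ rem).getD 0 0 = a := by
      simp
    rw [e0', show k + 1 - 1 = k from rfl, ek]
theorem starts_structure (a : Int) (rem : List Int) (k : Nat)
    (hhead : ∀ z ∈ rem.head?, z ≠ a + k + 1) :
    bStarts (a :: (List.range k).map (fun i : Nat => a + 1 + (i : Int)) ++ rem)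
      = 0 :: (bStarts rem).map ((k + 1) + ·) := by
  set block : List Int := (List.range k).map (fun i : Nat => a + 1 + (i : Int)) with hb
  set xs : List Int := a :: block ++ rem with hxs
  have hbl : block.length = k := by simp [hb]
  have hlen : xs.length = (k + 1) + rem.length := by simp [hxs, hbl]; omega
  have hg0 : ∀ i : Nat, i ≤ k → xs.getD i 0 = a + i := by
    intro i hi
    match i with
    | 0 => simp [hxs]
    | j + 1 =>
      have hj : j < k := by omega
      rw [hxs, List.cons_append, List.getD_cons_succ, List.getD_append _ _ _ _ (by omega), hb]
      simp [List.getD, hj]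
      ring
  have hg2 : ∀ i : Nat, xs.getD ((k + 1) + i) 0 = rem.getD i 0 := by
    intro i
    rw [hxs, List.cons_append, show (k+1)+i = (k+i)+1 from by omega, List.getD_cons_succ,
      List.getD_append_right _ _ _ _ (by omega), hbl]
    congr 1; omega
  set p : Nat → Bool := fun i => i == 0 || !(xs.getD i 0 == xs.getD (i - 1) 0 + 1) with hp
  have hfirst : (List.range (k + 1)).filter p = [0] := by
    rw [List.range_succ_eq_map, List.filter_cons]
    have hp0 : p 0 = true := by simp [hp]
    rw [if_pos (by simp [hp])]
    congr 1
    apply List.filter_eq_nil_iff.mpr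
    intro x hx
    simp only [List.mem_map, List.mem_range] at hx
    obtain ⟨j, hj, rfl⟩ := hx
    have e1 : xs.getD (j.succ) 0 = a + j + 1 := by rw [hg0 (j+1) (by omega)]; push_cast; ring
    have e2 : xs.getD (j.succ - 1) 0 = a + j := by simpa using hg0 j (by omega)
    simp only [hp, e1, e2]
    simp
  have hsecond : ((List.range rem.length).map ((k+1) + ·)).filter p
      = ((List.range rem.length).filter (fun i => i == 0 || !(rem.getD i 0 == rem.getD (i - 1) 0 + 1))).map ((k+1) + ·) := by
    rw [List.filter_map]
    congr 1
    apply List.filter_congr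
    intro i hi
    simp only [List.mem_range] at hi
    match i with
    | 0 =>
      have hz : rem.getD 0 0 ≠ a + k + 1 := by
        cases rem with
        | nil => simp at hi
        | cons z t => simpa using hhead z rfl
      have e1 : xs.getD ((k+1) + 0) 0 = rem.getD 0 0 := hg2 0
      have e2 : xs.getD ((k+1) + 0 - 1) 0 = a + k := by
        simpa using hg0 k (by omega)
      simp only [Function.comp, hp, e1, e2]
      simp
      simpa [List.getD] using hz
    | j + 1 =>
      have e1 : xs.getD ((k+1) + (j+1)) 0 = rem.getD (j+1) 0 := hg2 (j+1)
      have e2 : xs.getD ((k+1) + (j+1) - 1) 0 = rem.getD j 0 := by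
        rw [show (k+1)+(j+1)-1 = (k+1)+j from by omega]; exact hg2 j
      simp only [Function.comp, hp, e1, e2]
      simp
  calc bStarts xs = (List.range ((k+1) + rem.length)).filter p := by rw [bStarts, ← hlen]
    _ = 0 :: (bStarts rem).map ((k + 1) + ·) := by
        rw [List.range_add, List.filter_append, hfirst, hsecond, bStarts]
        rfl


theorem Blist_eq_runs (xs : List Int) :
    ((bStarts xs).zip ((bStarts xs).tail ++ [xs.length])).map (bFmt xs) = ccRuns xs := by
  fun_induction ccRuns xs with
  | case1 => simp [bStarts]
  | case2 a rest ih =>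
    obtain ⟨k, h1, h2, h3⟩ := chop_decomp a rest
    rw [h1]
    generalize hg : (ccChop a rest).2 = rem at h2 h3 ih ⊢
    subst h2
    simp only [← List.cons_append]
    have hlen : (a :: (List.range k).map (fun i : Nat => a + 1 + (i : Int)) ++ rem).length
        = (k + 1) + rem.length := by simp; omega
    have hS := starts_structure a rem k h3
    by_cases hne : rem = []
    · subst hne
      have hSe : bStarts (a :: (List.range k).map (fun i : Nat => a + 1 + (i : Int)) ++ []) = [0] := by
        rw [hS]; simp [bStarts]
      rw [hSe, hlen]
      simp only [List.tail_cons, List.nil_append, List.zip_cons_cons, List.zip_nil_left,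
        List.map_cons, List.map_nil]
      rw [show (k + 1) + ([] : List Int).length = k + 1 from by simp, fmt_head]
      rw [ccRuns]
    · obtain ⟨t, hT, hTpos⟩ := starts_head rem hne
      rw [hT] at hS
      rw [hS, hlen]
      have hmap : (((0 : Nat) :: t).map ((k + 1) + ·)) = (k + 1) :: t.map ((k + 1) + ·) := by
        simp
      rw [hmap]
      simp only [List.tail_cons, List.cons_append, List.zip_cons_cons, List.map_cons]
      simp only [← List.cons_append]
      rw [fmt_head]
      have htail : t.map ((k + 1) + ·) ++ [(k + 1) + rem.length]
          = (t ++ [rem.length]).map ((k + 1) + ·) := by simp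
      rw [htail, ← hmap, List.zip_map, List.map_map]
      have hpt : ∀ p ∈ ((0 : Nat) :: t).zip (t ++ [rem.length]),
          (bFmt (a :: (List.range k).map (fun i : Nat => a + 1 + (i : Int)) ++ rem)
              ∘ Prod.map ((k + 1) + ·) ((k + 1) + ·)) p
            = bFmt rem p := by
        intro p hp
        obtain ⟨s, e⟩ := p
        obtain ⟨hs, he⟩ := List.of_mem_zip hp
        have he1 : 1 ≤ e := by
          rcases List.mem_append.mp he with h' | h'
          · exact hTpos e h'
          · have : e = rem.length := by simpa using h'
            subst this
            cases rem with
            | nil => exact absurd rfl hne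
            | cons _ _ => simp
        have g1 : (a :: (List.range k).map (fun i : Nat => a + 1 + (i : Int)) ++ rem).getD ((k + 1) + s) 0
            = rem.getD s 0 := getD_rem a rem k s
        have g2 : (a :: (List.range k).map (fun i : Nat => a + 1 + (i : Int)) ++ rem).getD ((k + 1) + e - 1) 0
            = rem.getD (e - 1) 0 := by
          rw [show (k + 1) + e - 1 = (k + 1) + (e - 1) from by omega]
          exact getD_rem a rem k (e - 1)
        by_cases hc : e - 1 = s
        · simp only [Function.comp, Prod.map, bFmt, g1]
          rw [if_pos (by omega), if_pos hc]
        · simp only [Function.comp, Prod.map, bFmt, g1, g2]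
          rw [if_neg (by omega), if_neg hc]
      rw [List.map_congr_left hpt]
      have hZ : ((0 : Nat) :: t).zip (t ++ [rem.length])
          = (bStarts rem).zip ((bStarts rem).tail ++ [rem.length]) := by rw [hT]; rfl
      rw [hZ, ih]

theorem B_eq_runs (xs : List Int) :
    collapse_cpulist_alt xs = PySem.Str.join "," (ccRuns xs) := by
  unfold collapse_cpulist_alt
  rw [Blist_eq_runs]

-- ===== VERDICT (by name: the statement is the Claim_ definition above) =====
theorem collapse_cpulist_spec : Claim_equal_collapse_cpulist := by
  intro xs _
  unfold Spec_collapse_cpulist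
  rw [A_eq_runs, B_eq_runs]
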